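-- pv_equiv track=rewrite | github.com/anmapie/advent-of-code | 2020/day14/day14.py | calculate_possible_addresses_from_seed
-- ===== SOURCE A (Python) =====
-- def calculate_possible_addresses_from_seed(bitmask_unstable_bits, seed_address):
--     possible_addresses = []
--     for list_index, unstable_bit_location in enumerate(bitmask_unstable_bits):
--         # subtract 2^(current unstable bit) and add to the possible addresses
--         next_seed_address = seed_address - (2 ** unstable_bit_location)
--         possible_addresses.append(next_seed_address)
--         # subtract the rest of the 2^n from this seed
--         possible_addresses += calculate_possible_addresses_from_seed(
--             bitmask_unstable_bits[list_index + 1 :], next_seed_address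
--         )
--
--     return possible_addresses
-- ===== SOURCE B (Python) =====
-- def calculate_possible_addresses_from_seed(bitmask_unstable_bits, seed_address):
--     # Iterative explicit-stack DFS reproducing the recursive pre-order of A.
--     n = len(bitmask_unstable_bits)
--     result = []
--     stack = [(i, seed_address) for i in range(n - 1, -1, -1)]
--     while stack:
--         i, base = stack.pop()
--         v = base - 2 ** bitmask_unstable_bits[i]
--         result.append(v)
--         for j in range(n - 1, i, -1):
--             stack.append((j, v))
--     return result
-- ===== Notes on version B (the rewrite author's own statement) =====
-- stated objective: alternative
-- what changed: Replaces A's recursion with list slicing by an explicit-stack iterative pre-order DFS over (index, base) pairs, pushing children in reverse index order.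
-- outside the precondition, e.g. on calculate_possible_addresses_from_seed([-1], 0): A returns [-0.5], B returns [-0.5]
import Mathlib
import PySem

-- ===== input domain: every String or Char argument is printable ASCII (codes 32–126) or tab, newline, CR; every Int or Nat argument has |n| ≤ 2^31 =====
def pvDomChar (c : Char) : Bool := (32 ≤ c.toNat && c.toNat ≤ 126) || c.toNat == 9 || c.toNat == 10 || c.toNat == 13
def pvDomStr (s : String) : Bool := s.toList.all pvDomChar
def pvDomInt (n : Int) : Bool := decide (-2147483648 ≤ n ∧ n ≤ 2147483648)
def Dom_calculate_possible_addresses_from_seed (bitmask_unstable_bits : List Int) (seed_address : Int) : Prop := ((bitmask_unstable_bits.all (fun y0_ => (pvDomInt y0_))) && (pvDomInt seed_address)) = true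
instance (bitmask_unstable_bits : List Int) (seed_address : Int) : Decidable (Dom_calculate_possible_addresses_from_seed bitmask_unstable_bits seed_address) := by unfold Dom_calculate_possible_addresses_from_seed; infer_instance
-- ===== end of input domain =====

-- B replaces A's recursion-with-slices by an explicit-stack iterative DFS (alternative decomposition, same pre-order output).

-- ===== PORT A =====
-- The Python for-loop over `enumerate` with the tail slice `bitmask_unstable_bits[list_index+1:]`
-- is exactly this structural recursion: head iteration emits `v` and the recursive call on the
-- tail with seed `v`; the remaining loop iterations (original seed) are the recursion on the tail.
-- `2 ** b` is ported as `2 ^ b.toNat`, exact for b ≥ 0 (Pre_ below; for b < 0 Python returns a float).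
def calculate_possible_addresses_from_seed : List Int → Int → List Int
  | [], _ => []
  | b :: rest, seed_address =>
      let v := seed_address - 2 ^ b.toNat
      (v :: calculate_possible_addresses_from_seed rest v)
        ++ calculate_possible_addresses_from_seed rest seed_address

-- ===== PORT B =====
-- Stack entries are (index, base); Lean list head = Python list end (top of stack).
-- pvMeasure bounds the number of loop iterations; it supplies the fuel that makes the
-- while-loop a structural recursion (the fuel never runs out, proved in pvLoop_eq below).
def pvMeasure (n : Nat) (st : List (Nat × Int)) : Nat :=
  (st.map (fun p => 2 ^ (n - p.1))).sum

-- `for j in range(n-1, i, -1): stack.append((j, v))` — counts j down to i+1, pushing each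
def pvPushChildren (v : Int) (i : Nat) : Nat → List (Nat × Int) → List (Nat × Int)
  | 0, st => st
  | j + 1, st => if i < j + 1 then pvPushChildren v i j ((j + 1, v) :: st) else st

-- `while stack:` loop; `bitmask_unstable_bits[i]` ported as `getD i 0`, exact because every
-- pushed index is in range; `2 ** b` ported as `2 ^ b.toNat`, exact for b ≥ 0 (Pre_)
def pvLoop (bits : List Int) : Nat → List (Nat × Int) → List Int → List Int
  | _, [], acc => acc
  | 0, _ :: _, acc => acc  -- fuel exhausted: unreachable for the fuel used below
  | fuel + 1, (i, base) :: rest, acc =>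
      let v := base - 2 ^ (bits.getD i 0).toNat
      pvLoop bits fuel (pvPushChildren v i (bits.length - 1) rest) (acc ++ [v])

def calculate_possible_addresses_from_seed_alt (bitmask_unstable_bits : List Int) (seed_address : Int) : List Int :=
  let st := (List.range bitmask_unstable_bits.length).map (fun i => (i, seed_address))
  pvLoop bitmask_unstable_bits (pvMeasure bitmask_unstable_bits.length st) st []

-- ===== PRECONDITION & SPEC =====
-- Pre_ excludes negative bit positions: there both Pythons return floats (2 ** b with b < 0),
-- which are not values of the declared List-Int return type.
def Pre_calculate_possible_addresses_from_seed (bitmask_unstable_bits : List Int) (seed_address : Int) : Prop :=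
  ∀ b ∈ bitmask_unstable_bits, 0 ≤ b
instance (bitmask_unstable_bits : List Int) (seed_address : Int) : Decidable (Pre_calculate_possible_addresses_from_seed bitmask_unstable_bits seed_address) := by unfold Pre_calculate_possible_addresses_from_seed; infer_instance

def pvWitness_calculate_possible_addresses_from_seed : List Int × Int := ([0, 1, 3], 5)

def Spec_calculate_possible_addresses_from_seed (bitmask_unstable_bits : List Int) (seed_address : Int) (out : List Int) : Prop := out = calculate_possible_addresses_from_seed_alt bitmask_unstable_bits seed_address
instance (bitmask_unstable_bits : List Int) (seed_address : Int) (out : List Int) : Decidable (Spec_calculate_possible_addresses_from_seed bitmask_unstable_bits seed_address out) := by unfold Spec_calculate_possible_addresses_from_seed; infer_instance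

-- ===== CLAIM (what is proved, stated in full; the proofs are below) =====
def Claim_equal_calculate_possible_addresses_from_seed : Prop := ∀ (bitmask_unstable_bits : List Int) (seed_address : Int), Dom_calculate_possible_addresses_from_seed bitmask_unstable_bits seed_address → Pre_calculate_possible_addresses_from_seed bitmask_unstable_bits seed_address → Spec_calculate_possible_addresses_from_seed bitmask_unstable_bits seed_address (calculate_possible_addresses_from_seed bitmask_unstable_bits seed_address)

-- ===== LEMMAS AND PROOFS =====

theorem pvPushChildren_eq (v : Int) (i j : Nat) (st : List (Nat × Int)) :
    pvPushChildren v i j st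
      = if i < j then pvPushChildren v i (j - 1) ((j, v) :: st) else st := by
  cases j <;> simp [pvPushChildren]

theorem pvPushChildren_measure (n : Nat) (v : Int) (i : Nat) :
    ∀ (j : Nat) (st : List (Nat × Int)), i ≤ j → j < n →
      pvMeasure n (pvPushChildren v i j st) + 2 ^ (n - j) ≤ pvMeasure n st + 2 ^ (n - i) := by
  intro j
  induction j with
  | zero =>
      intro st hij hn
      rw [pvPushChildren_eq]
      simp only [Nat.not_lt_zero, if_false]
      have hi0 : i = 0 := Nat.le_zero.mp hij
      subst hi0
      omega
  | succ j ih =>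
      intro st hij hn
      rw [pvPushChildren_eq]
      by_cases h : i < j + 1
      · simp only [h, if_true, Nat.add_sub_cancel]
        rcases Nat.lt_or_ge i j with hij' | hij'
        · have := ih ((j + 1, v) :: st) (Nat.le_of_lt hij') (by omega)
          have hmc : pvMeasure n ((j + 1, v) :: st) = 2 ^ (n - (j + 1)) + pvMeasure n st := by
            simp [pvMeasure]
          rw [hmc] at this
          have hpow : 2 ^ (n - (j + 1)) + 2 ^ (n - (j + 1)) ≤ 2 ^ (n - j) := by
            have h1 : n - j = (n - (j + 1)) + 1 := by omega
            rw [h1, pow_succ]; omega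
          omega
        · -- i = j
          have hij2 : i = j := by omega
          subst hij2
          rw [pvPushChildren_eq]
          simp only [Nat.lt_irrefl, if_false]
          have hmc : pvMeasure n ((i + 1, v) :: st) = 2 ^ (n - (i + 1)) + pvMeasure n st := by
            simp [pvMeasure]
          have hpow : 2 ^ (n - (i + 1)) + 2 ^ (n - (i + 1)) ≤ 2 ^ (n - i) := by
            have h1 : n - i = (n - (i + 1)) + 1 := by omega
            rw [h1, pow_succ]; omega
          omega
      · simp only [h, if_false]
        have hi1 : i = j + 1 := by omega
        subst hi1
        omega

theorem pvPushChildren_lt (n : Nat) (v : Int) (i : Nat) (st : List (Nat × Int)) :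
    pvMeasure n (pvPushChildren v i (n - 1) st) < 2 ^ (n - i) + pvMeasure n st := by
  rcases Nat.lt_or_ge i (n - 1) with h | h
  · have hn : n - 1 < n := by omega
    have := pvPushChildren_measure n v i (n - 1) st (Nat.le_of_lt h) hn
    have hpos : 1 ≤ 2 ^ (n - (n - 1)) := Nat.one_le_two_pow
    omega
  · rw [pvPushChildren_eq]
    simp only [Nat.not_lt.mpr h, if_false]
    have hpos : 1 ≤ 2 ^ (n - i) := Nat.one_le_two_pow
    omega

-- the pre-order output of the subtree rooted at stack entry (i, base)
def pvSub (bits : List Int) (p : Nat × Int) : List Int :=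
  let v := p.2 - 2 ^ (bits.getD p.1 0).toNat
  v :: calculate_possible_addresses_from_seed (bits.drop (p.1 + 1)) v

theorem A_drop_eq (bits : List Int) :
    ∀ (d : Nat) (k : Nat) (base : Int), bits.length - k = d →
      calculate_possible_addresses_from_seed (bits.drop k) base
        = (List.range' k d).flatMap (fun j => pvSub bits (j, base)) := by
  intro d
  induction d with
  | zero =>
      intro k base h
      have : bits.drop k = [] := List.drop_eq_nil_iff.mpr (by omega)
      simp [this, calculate_possible_addresses_from_seed]
  | succ d ih =>
      intro k base h
      have hk : k < bits.length := by omega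
      have hdrop : bits.drop k = bits[k] :: bits.drop (k + 1) :=
        List.drop_eq_getElem_cons hk
      rw [hdrop, calculate_possible_addresses_from_seed]
      have ihk := ih (k + 1) base (by omega)
      rw [List.range'_succ, List.flatMap_cons, ihk]
      simp [pvSub, List.getElem?_eq_getElem hk]

theorem pushChildren_flatMap (bits : List Int) (v : Int) (i : Nat) :
    ∀ (j : Nat) (st : List (Nat × Int)), i ≤ j →
      (pvPushChildren v i j st).flatMap (pvSub bits)
        = (List.range' (i + 1) (j - i)).flatMap (fun m => pvSub bits (m, v))
            ++ st.flatMap (pvSub bits) := by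
  intro j
  induction j with
  | zero =>
      intro st hij
      rw [pvPushChildren]
      simp
  | succ j ih =>
      intro st hij
      rw [pvPushChildren]
      by_cases h : i < j + 1
      · simp only [h, if_true]
        rw [ih ((j + 1, v) :: st) (by omega)]
        have hr : List.range' (i + 1) (j + 1 - i) = List.range' (i + 1) (j - i) ++ [j + 1] := by
          have h1 : j + 1 - i = (j - i) + 1 := by omega
          rw [h1, List.range'_concat]
          congr 2
          omega
        rw [hr]
        simp [List.flatMap_append]
      · simp only [h, if_false]
        have : j + 1 - i = 0 := by omega
        simp [this]

theorem pvLoop_eq (bits : List Int) :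
    ∀ (fuel : Nat) (st : List (Nat × Int)) (acc : List Int),
      pvMeasure bits.length st ≤ fuel →
      pvLoop bits fuel st acc = acc ++ st.flatMap (pvSub bits) := by
  intro fuel
  induction fuel with
  | zero =>
      intro st acc hf
      cases st with
      | nil => simp [pvLoop]
      | cons p rest =>
          exfalso
          have h1 : 1 ≤ 2 ^ (bits.length - p.1) := Nat.one_le_two_pow
          have h2 : pvMeasure bits.length (p :: rest)
              = 2 ^ (bits.length - p.1) + pvMeasure bits.length rest := by
            simp [pvMeasure]
          omega
  | succ fuel ih =>
      intro st acc hf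
      cases st with
      | nil => simp [pvLoop]
      | cons p rest =>
          obtain ⟨i, base⟩ := p
          rw [pvLoop]
          have hmc : pvMeasure bits.length ((i, base) :: rest)
              = 2 ^ (bits.length - i) + pvMeasure bits.length rest := by
            simp [pvMeasure]
          set v := base - 2 ^ (bits.getD i 0).toNat with hv
          have hflt := pvPushChildren_lt bits.length v i rest
          rw [ih (pvPushChildren v i (bits.length - 1) rest) (acc ++ [v]) (by omega)]
          rcases Nat.lt_or_ge i bits.length with hi | hi
          · rw [pushChildren_flatMap bits v i (bits.length - 1) rest (by omega)]
            have hA := A_drop_eq bits (bits.length - 1 - i) (i + 1) v (by omega)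
            rw [List.flatMap_cons]
            show acc ++ [v] ++ ((List.range' (i + 1) (bits.length - 1 - i)).flatMap
                  (fun m => pvSub bits (m, v)) ++ rest.flatMap (pvSub bits))
                = acc ++ (pvSub bits (i, base) ++ rest.flatMap (pvSub bits))
            rw [← hA]
            show acc ++ [v] ++ (calculate_possible_addresses_from_seed (bits.drop (i + 1)) v
                  ++ rest.flatMap (pvSub bits))
                = acc ++ ((v :: calculate_possible_addresses_from_seed (bits.drop (i + 1)) v)
                  ++ rest.flatMap (pvSub bits))
            simp
          · -- i out of range: no children pushed, subtree output is just [v]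
            rw [pvPushChildren_eq]
            have hnc : ¬ i < bits.length - 1 := by omega
            simp only [hnc, if_false]
            have hdrop : bits.drop (i + 1) = [] := List.drop_eq_nil_iff.mpr (by omega)
            rw [List.flatMap_cons]
            show acc ++ [v] ++ rest.flatMap (pvSub bits)
                = acc ++ ((v :: calculate_possible_addresses_from_seed (bits.drop (i + 1)) v)
                  ++ rest.flatMap (pvSub bits))
            rw [hdrop]
            simp [calculate_possible_addresses_from_seed]

theorem ports_agree (bits : List Int) (seed : Int) :
    calculate_possible_addresses_from_seed bits seed
      = calculate_possible_addresses_from_seed_alt bits seed := by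
  unfold calculate_possible_addresses_from_seed_alt
  rw [pvLoop_eq bits _ _ _ (Nat.le_refl _)]
  have h0 := A_drop_eq bits bits.length 0 seed (by omega)
  simp only [List.drop_zero] at h0
  rw [h0]
  rw [List.range_eq_range', List.flatMap_map]
  simp

-- ===== VERDICT (by name: the statement is the Claim_ definition above) =====
theorem calculate_possible_addresses_from_seed_spec : Claim_equal_calculate_possible_addresses_from_seed := by
  intro bits seed _ _
  unfold Spec_calculate_possible_addresses_from_seed
  exact ports_agree bits seed
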